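-- pv_equiv track=rewrite | github.com/ThanosSpin/trading-bot | model_xgb.py | find_matching_feature
-- ===== SOURCE A (Python) =====
-- def normalize_feature_name(name: str) -> str:
--     """
--     Normalize feature name for matching.
--     - Lowercase
--     - Remove underscores
--     - Remove spaces
--     """
--     return name.lower().replace('_', '').replace(' ', '')
--
-- def find_matching_feature(model_feat: str, available_features: list) -> str:
--     """
--     Find matching feature with fuzzy logic.
--
--     Returns:
--         Matched feature name or None
--     """
--     # Try exact match
--     if model_feat in available_features:
--         return model_feat
--
--     # Try case-insensitive
--     for feat in available_features:
--         if feat.lower() == model_feat.lower():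
--             return feat
--
--     # Try normalized (no underscores, lowercase)
--     model_normalized = normalize_feature_name(model_feat)
--     for feat in available_features:
--         if normalize_feature_name(feat) == model_normalized:
--             return feat
--
--     # No match
--     return None
-- ===== SOURCE B (Python) =====
-- def normalize_feature_name(name: str) -> str:
--     return name.lower().replace('_', '').replace(' ', '')
--
-- def find_matching_feature(model_feat: str, available_features: list) -> str:
--     model_lower = model_feat.lower()
--     model_normalized = normalize_feature_name(model_feat)
--     first_ci = None
--     first_norm = None
--     for feat in available_features:
--         if feat == model_feat:
--             return feat
--         if first_ci is None and feat.lower() == model_lower: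
--             first_ci = feat
--         if first_norm is None and normalize_feature_name(feat) == model_normalized:
--             first_norm = feat
--     if first_ci is not None:
--         return first_ci
--     return first_norm
-- ===== Notes on version B (the rewrite author's own statement) =====
-- stated objective: alternative
-- what changed: Replaced A's three separate scans (membership test + case-insensitive loop + normalized loop) with one single pass that early-returns on an exact match and records the first case-insensitive and first normalized hits, with the query's lowercase/normalized form computed once.
import Mathlib
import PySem

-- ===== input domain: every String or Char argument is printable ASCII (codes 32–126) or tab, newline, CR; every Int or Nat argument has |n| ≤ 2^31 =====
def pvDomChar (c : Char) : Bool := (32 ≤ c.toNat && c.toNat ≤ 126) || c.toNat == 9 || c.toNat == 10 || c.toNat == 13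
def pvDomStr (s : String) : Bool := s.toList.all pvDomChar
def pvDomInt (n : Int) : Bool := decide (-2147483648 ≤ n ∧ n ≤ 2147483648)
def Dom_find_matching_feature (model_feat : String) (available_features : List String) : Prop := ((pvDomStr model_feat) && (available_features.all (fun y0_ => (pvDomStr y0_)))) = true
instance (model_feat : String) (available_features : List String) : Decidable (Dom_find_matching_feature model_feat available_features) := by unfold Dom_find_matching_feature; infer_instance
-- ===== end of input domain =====

-- B replaces A's three scans by one pass recording the first case-insensitive and first normalized hits (alternative decomposition, same cost).

-- ===== PORT A =====
-- name.lower().replace('_', '').replace(' ', '')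
def normalize_feature_name (name : String) : String :=
  PySem.Str.replace (PySem.Str.replace (PySem.Str.lower name) "_" "") " " ""

def find_matching_feature (model_feat : String) (available_features : List String) : Option String :=
  if available_features.contains model_feat then some model_feat
  else
    match available_features.find? (fun feat => PySem.Str.lower feat == PySem.Str.lower model_feat) with
    | some feat => some feat
    | none =>
      let model_normalized := normalize_feature_name model_feat
      match available_features.find? (fun feat => normalize_feature_name feat == model_normalized) with
      | some feat => some feat
      | none => none

-- ===== PORT B =====
def fmfLoop (model_feat model_lower model_normalized : String) :
    List String → Option String → Option String → Option String
  | [], first_ci, first_norm =>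
      match first_ci with
      | some g => some g
      | none => first_norm
  | feat :: rest, first_ci, first_norm =>
      if feat == model_feat then some feat
      else
        fmfLoop model_feat model_lower model_normalized rest
          (match first_ci with
           | some g => some g
           | none => if PySem.Str.lower feat == model_lower then some feat else none)
          (match first_norm with
           | some g => some g
           | none => if normalize_feature_name feat == model_normalized then some feat else none)

def find_matching_feature_alt (model_feat : String) (available_features : List String) : Option String :=
  fmfLoop model_feat (PySem.Str.lower model_feat) (normalize_feature_name model_feat)
    available_features none none

-- ===== PRECONDITION & SPEC =====
def Spec_find_matching_feature (model_feat : String) (available_features : List String) (out : Option String) : Prop := out = find_matching_feature_alt model_feat available_features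
instance (model_feat : String) (available_features : List String) (out : Option String) : Decidable (Spec_find_matching_feature model_feat available_features out) := by unfold Spec_find_matching_feature; infer_instance

-- ===== CLAIM (what is proved, stated in full; the proofs are below) =====
def Claim_equal_find_matching_feature : Prop := ∀ (model_feat : String) (available_features : List String), Dom_find_matching_feature model_feat available_features → Spec_find_matching_feature model_feat available_features (find_matching_feature model_feat available_features)

-- ===== LEMMAS AND PROOFS =====

-- Characterisation of B's loop: an exact match wins, otherwise the stored candidate
-- (or, failing that, the first hit in the remaining list) for each fallback tier.
theorem fmfLoop_eq (mf L N : String) (l : List String) (ci nm : Option String) :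
    fmfLoop mf L N l ci nm =
      match l.find? (fun f => f == mf) with
      | some f => some f
      | none =>
        match (match ci with
               | some g => some g
               | none => l.find? (fun f => PySem.Str.lower f == L)) with
        | some g => some g
        | none =>
          match nm with
          | some g => some g
          | none => l.find? (fun f => normalize_feature_name f == N) := by
  induction l generalizing ci nm with
  | nil => cases ci <;> cases nm <;> simp [fmfLoop]
  | cons f rest ih =>
    by_cases hf : (f == mf) = true
    · rw [List.find?_cons_of_pos (p := fun f => f == mf) (l := rest) hf]
      simp only [fmfLoop, if_pos hf]
    · rw [List.find?_cons_of_neg (p := fun f => f == mf) (l := rest) (by simpa using hf)]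
      simp only [fmfLoop, if_neg hf]
      rw [ih]
      cases ci <;> cases nm <;>
        by_cases h2 : (PySem.Str.lower f == L) = true <;>
        by_cases h3 : (normalize_feature_name f == N) = true <;>
        simp [h2, h3]

theorem find?_exact_of_contains (mf : String) (l : List String)
    (h : l.contains mf = true) : l.find? (fun f => f == mf) = some mf := by
  induction l with
  | nil => simp at h
  | cons a rest ih =>
    by_cases ha : (a == mf) = true
    · rw [List.find?_cons_of_pos (p := fun f => f == mf) (l := rest) ha]
      exact congrArg some (eq_of_beq ha)
    · rw [List.find?_cons_of_neg (p := fun f => f == mf) (l := rest) (by simpa using ha)]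
      apply ih
      simp only [List.contains_cons, Bool.or_eq_true] at h
      rcases h with h' | h'
      · exact absurd (beq_iff_eq.mpr (eq_of_beq h').symm) ha
      · exact h'

theorem find?_exact_of_not_contains (mf : String) (l : List String)
    (h : l.contains mf = false) : l.find? (fun f => f == mf) = none := by
  rw [List.find?_eq_none]
  intro x hx
  by_cases h' : (x == mf) = true
  · exfalso
    have hxm : x = mf := eq_of_beq h'
    subst hxm
    simp at h
    exact h hx
  · simpa using h'

-- ===== VERDICT (by name: the statement is the Claim_ definition above) =====
theorem find_matching_feature_spec : Claim_equal_find_matching_feature := by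
  intro mf av _
  unfold Spec_find_matching_feature find_matching_feature find_matching_feature_alt
  rw [fmfLoop_eq]
  cases h : av.contains mf with
  | true =>
    rw [find?_exact_of_contains mf av h]
    simp
  | false =>
    rw [if_neg (by simp), find?_exact_of_not_contains mf av h]
    cases hci : av.find? (fun feat => PySem.Str.lower feat == PySem.Str.lower mf) <;>
      simp only [hci] <;>
      cases hn : av.find? (fun feat => normalize_feature_name feat == normalize_feature_name mf) <;>
      simp [hn]
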